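-- pv_equiv track=rewrite | github.com/NavchetanKaur/local_tool | transplanttoolbox/ancillary_funcs.py | split_gl_string_per_locus
-- ===== SOURCE A (Python) =====
-- def split_gl_string_per_locus(gl_string, donor_bws_string):
-- 	a_string = ""
-- 	b_string = ""
-- 	bw_string = ""
-- 	c_string = ""
-- 	dr_string = ""
-- 	dq_string = ""
--
-- 	gl_string_split = gl_string.split("^")
--
-- 	for string in gl_string_split:
-- 		if string.startswith("A"):
-- 			a_string = string.replace("+", " + ")
-- 			a_string = a_string.replace("/", "/ ")
--
-- 		if string.startswith("B"):
-- 			b_string = string.replace("+", " + ")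
-- 			b_string = b_string.replace("/", "/ ")
--
-- 		if string.startswith("C"):
-- 			c_string = string.replace("+", " + ")
-- 			c_string = c_string.replace("/", "/ ")
--
-- 		if string.startswith("DR"):
-- 			dr_string = string.replace("+", " + ")
-- 			dr_string = dr_string.replace("/", "/ ")
--
-- 		if string.startswith("DQ"):
-- 			dq_string = string.replace("+", " + ")
-- 			dq_string = dq_string.replace("/", "/ ")
--
-- 	bw_string = donor_bws_string
--
-- 	string_list = [a_string] + [b_string] + [bw_string] +[c_string] + [dr_string] + [dq_string]
--
-- 	return string_list
-- ===== SOURCE B (Python) =====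
-- def split_gl_string_per_locus(gl_string, donor_bws_string):
--     def fmt(s):
--         return s.replace("+", " + ").replace("/", "/ ")
--     pieces = gl_string.split("^")
--     def last(prefix):
--         return next((fmt(s) for s in reversed(pieces) if s.startswith(prefix)), "")
--     return [last("A"), last("B"), donor_bws_string,
--             last("C"), last("DR"), last("DQ")]
-- ===== Notes on version B (the rewrite author's own statement) =====
-- stated objective: simpler
-- what changed: Replaces the single stateful loop with five overwritten accumulators by a per-locus backwards scan (next over reversed pieces) that picks the last matching piece directly, with a shared formatter helper.
import Mathlib
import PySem

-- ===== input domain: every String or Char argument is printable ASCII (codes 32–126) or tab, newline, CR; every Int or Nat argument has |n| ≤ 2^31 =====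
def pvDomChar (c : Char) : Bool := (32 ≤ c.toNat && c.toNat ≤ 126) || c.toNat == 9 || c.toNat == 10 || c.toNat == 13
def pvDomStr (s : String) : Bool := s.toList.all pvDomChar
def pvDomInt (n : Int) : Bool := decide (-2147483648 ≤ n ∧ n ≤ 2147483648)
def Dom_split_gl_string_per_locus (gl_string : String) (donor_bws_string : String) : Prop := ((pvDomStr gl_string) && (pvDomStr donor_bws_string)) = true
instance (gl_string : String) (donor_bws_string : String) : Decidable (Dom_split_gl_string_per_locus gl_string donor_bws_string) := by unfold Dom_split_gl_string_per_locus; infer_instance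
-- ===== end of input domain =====

-- B replaces A's single stateful loop (five overwritten accumulators) by a per-locus
-- backwards scan picking the last matching piece; objective: simpler.

-- ===== PORT A =====
-- loop body of A: update each of the five accumulators on its prefix test
def pvStepA (acc : String × String × String × String × String) (s : String) :
    String × String × String × String × String :=
  let a := if PySem.Str.startswith s "A" then
      PySem.Str.replace (PySem.Str.replace s "+" " + ") "/" "/ " else acc.1
  let b := if PySem.Str.startswith s "B" then
      PySem.Str.replace (PySem.Str.replace s "+" " + ") "/" "/ " else acc.2.1
  let c := if PySem.Str.startswith s "C" then
      PySem.Str.replace (PySem.Str.replace s "+" " + ") "/" "/ " else acc.2.2.1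
  let dr := if PySem.Str.startswith s "DR" then
      PySem.Str.replace (PySem.Str.replace s "+" " + ") "/" "/ " else acc.2.2.2.1
  let dq := if PySem.Str.startswith s "DQ" then
      PySem.Str.replace (PySem.Str.replace s "+" " + ") "/" "/ " else acc.2.2.2.2
  (a, b, c, dr, dq)

def split_gl_string_per_locus (gl_string : String) (donor_bws_string : String) : List String :=
  let gl_string_split := (PySem.Chars.splitOn gl_string.toList "^".toList).map String.ofList  -- exact: s.split("^"), sep nonempty
  let st := gl_string_split.foldl pvStepA ("", "", "", "", "")
  [st.1, st.2.1, donor_bws_string, st.2.2.1, st.2.2.2.1, st.2.2.2.2]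

-- ===== PORT B =====
def pvFmt (s : String) : String :=
  PySem.Str.replace (PySem.Str.replace s "+" " + ") "/" "/ "

-- last piece starting with the given prefix, formatted; "" if none (next(..., "") over reversed)
def pvLast (pieces : List String) (pre : String) : String :=
  match pieces.reverse.find? (fun s => PySem.Str.startswith s pre) with
  | some s => pvFmt s
  | none => ""

def split_gl_string_per_locus_alt (gl_string : String) (donor_bws_string : String) : List String :=
  let pieces := (PySem.Chars.splitOn gl_string.toList "^".toList).map String.ofList  -- exact: s.split("^"), sep nonempty
  [pvLast pieces "A", pvLast pieces "B", donor_bws_string,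
   pvLast pieces "C", pvLast pieces "DR", pvLast pieces "DQ"]

-- ===== PRECONDITION & SPEC =====
def Spec_split_gl_string_per_locus (gl_string : String) (donor_bws_string : String) (out : List String) : Prop := out = split_gl_string_per_locus_alt gl_string donor_bws_string
instance (gl_string : String) (donor_bws_string : String) (out : List String) : Decidable (Spec_split_gl_string_per_locus gl_string donor_bws_string out) := by unfold Spec_split_gl_string_per_locus; infer_instance

-- ===== CLAIM (what is proved, stated in full; the proofs are below) =====
def Claim_equal_split_gl_string_per_locus : Prop := ∀ (gl_string : String) (donor_bws_string : String), Dom_split_gl_string_per_locus gl_string donor_bws_string → Spec_split_gl_string_per_locus gl_string donor_bws_string (split_gl_string_per_locus gl_string donor_bws_string)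

-- ===== LEMMAS AND PROOFS =====

-- "last match with default init", the value pvLast computes when init = ""
def pvF (pre : String) (l : List String) (init : String) : String :=
  ((l.reverse.find? (fun s => PySem.Str.startswith s pre)).map pvFmt).getD init

theorem pvF_cons (pre x : String) (xs : List String) (init : String) :
    pvF pre (x :: xs) init
      = pvF pre xs (if PySem.Str.startswith x pre then pvFmt x else init) := by
  unfold pvF
  rw [List.reverse_cons, List.find?_append]
  cases h : xs.reverse.find? (fun s => PySem.Str.startswith s pre) with
  | some s => simp
  | none =>
      simp only [Option.none_or, List.find?_cons, List.find?_nil, PySem.Str.startswith]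
      split <;> rename_i hq <;> simp [hq]

theorem pvLast_eq (pieces : List String) (pre : String) :
    pvLast pieces pre = pvF pre pieces "" := by
  unfold pvLast pvF
  cases pieces.reverse.find? (fun s => PySem.Str.startswith s pre) <;> rfl

theorem foldl_stepA_eq (l : List String) :
    ∀ (a b c d q : String),
      l.foldl pvStepA (a, b, c, d, q)
        = (pvF "A" l a, pvF "B" l b, pvF "C" l c, pvF "DR" l d, pvF "DQ" l q) := by
  induction l with
  | nil => intro a b c d q; simp [pvF]
  | cons x xs ih =>
      intro a b c d q
      rw [List.foldl_cons]
      show xs.foldl pvStepA (pvStepA (a, b, c, d, q) x) = _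
      rw [pvStepA, ih]
      rw [pvF_cons, pvF_cons, pvF_cons, pvF_cons, pvF_cons]
      simp [pvFmt]

-- ===== VERDICT (by name: the statement is the Claim_ definition above) =====
theorem split_gl_string_per_locus_spec : Claim_equal_split_gl_string_per_locus := by
  intro gl donor _
  unfold Spec_split_gl_string_per_locus split_gl_string_per_locus split_gl_string_per_locus_alt
  simp only [foldl_stepA_eq, pvLast_eq]
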